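-- pv_equiv track=rewrite | github.com/codingismycraft/codingismycraft | algorithms/buy_sell_stock/buy_sell_stock.py | right_side_max_deltas
-- ===== SOURCE A (Python) =====
-- def right_side_max_deltas(prices):
--     """Returns a list whose each element has the max delta from right side.
--
--     :param list prices: The list of prices.
--
--     :return: The list with the max delta from right.
--     :rtype: list.
--     """
--     deltas = [0] * len(prices)
--     index = len(prices) - 1
--
--     largest_so_far = None
--     lower_so_far = None
--     m = 0
--
--     while index >= 0:
--         value = prices[index]
--
--         if largest_so_far is None or largest_so_far < value:
--             largest_so_far = value
--             lower_so_far = value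
--
--         if lower_so_far is None or lower_so_far > value:
--             lower_so_far = value
--
--         m = max(m, largest_so_far - lower_so_far)
--         deltas[index] = m
--
--         index -= 1
--
--     return deltas
-- ===== SOURCE B (Python) =====
-- def right_side_max_deltas(prices):
--     """Two-pass version: materialize the suffix-max table, then accumulate
--     the best non-negative delta in a second backward pass."""
--     n = len(prices)
--     suffmax = [0] * n
--     for i in range(n - 1, -1, -1):
--         suffmax[i] = prices[i] if i == n - 1 else max(prices[i], suffmax[i + 1])
--     deltas = [0] * n
--     best = 0
--     for i in range(n - 1, -1, -1):
--         best = max(best, suffmax[i] - prices[i])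
--         deltas[i] = best
--     return deltas
-- ===== Notes on version B (the rewrite author's own statement) =====
-- stated objective: alternative
-- what changed: Replaces A's fused single backward pass (running max, resetting running min, running best) with two separate backward passes: one materializing a suffix-maximum table, one accumulating best = max(best, suffmax[i]-prices[i]).
import Mathlib
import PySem

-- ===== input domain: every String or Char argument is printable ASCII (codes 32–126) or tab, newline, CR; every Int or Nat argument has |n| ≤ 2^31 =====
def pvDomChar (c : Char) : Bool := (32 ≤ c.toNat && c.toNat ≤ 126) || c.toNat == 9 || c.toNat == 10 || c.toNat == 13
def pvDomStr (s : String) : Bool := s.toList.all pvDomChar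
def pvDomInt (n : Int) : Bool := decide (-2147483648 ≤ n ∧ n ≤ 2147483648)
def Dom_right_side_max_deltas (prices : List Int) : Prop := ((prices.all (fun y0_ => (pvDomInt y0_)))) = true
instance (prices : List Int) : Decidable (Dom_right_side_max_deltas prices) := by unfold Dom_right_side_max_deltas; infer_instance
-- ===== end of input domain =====

-- B replaces A's fused single backward pass with two backward passes (suffix-max table, then best-delta accumulation); same O(n) cost, different decomposition.

-- ===== PORT A =====
-- A's while-loop runs from the last index down; we recurse over the reversed
-- list (rightmost element first) and reverse the produced deltas back.
-- State: largest_so_far / lower_so_far as Options (None at start), running m.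
-- `.getD 0` is only a totalizer: after the two updates both options are `some`
-- (exactly as in Python, where the subtraction is only reached with both set).
def pvALoop : List Int → Option Int → Option Int → Int → List Int
  | [], _, _, _ => []
  | v :: rest, largestO, lowerO, m =>
    let upd1 : Bool := match largestO with | none => true | some l => decide (l < v)
    let largestO' := if upd1 then some v else largestO
    let lowerO' := if upd1 then some v else lowerO
    let upd2 : Bool := match lowerO' with | none => true | some l => decide (l > v)
    let lowerO'' := if upd2 then some v else lowerO'
    let m' := max m (largestO'.getD 0 - lowerO''.getD 0)
    m' :: pvALoop rest largestO' lowerO'' m'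

def right_side_max_deltas (prices : List Int) : List Int :=
  (pvALoop prices.reverse none none 0).reverse

-- ===== PORT B =====
-- suffmax[i] = prices[i] if last, else max(prices[i], suffmax[i+1])  (B's first backward pass)
def pvSuffList : List Int → List Int
  | [] => []
  | v :: rest =>
    match pvSuffList rest with
    | [] => [v]
    | s :: t => max v s :: s :: t

-- B's second backward pass: best = max(best, suffmax[i] - prices[i]); deltas[i] = best
def pvBLoop : List (Int × Int) → Int → List Int
  | [], _ => []
  | (p, s) :: rest, best =>
    let best' := max best (s - p)
    best' :: pvBLoop rest best'

def right_side_max_deltas_alt (prices : List Int) : List Int :=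
  (pvBLoop ((prices.zip (pvSuffList prices)).reverse) 0).reverse

-- ===== PRECONDITION & SPEC =====
def Spec_right_side_max_deltas (prices : List Int) (out : List Int) : Prop := out = right_side_max_deltas_alt prices
instance (prices : List Int) (out : List Int) : Decidable (Spec_right_side_max_deltas prices out) := by unfold Spec_right_side_max_deltas; infer_instance

-- ===== CLAIM (what is proved, stated in full; the proofs are below) =====
def Claim_equal_right_side_max_deltas : Prop := ∀ (prices : List Int), Dom_right_side_max_deltas prices → Spec_right_side_max_deltas prices (right_side_max_deltas prices)

-- ===== LEMMAS AND PROOFS =====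

-- one step of the running maximum, as an Option
def pvMaxo (o : Option Int) (v : Int) : Option Int :=
  some (match o with | none => v | some l => max l v)

-- the reversed-price list annotated with its running maximum
def pvAnnot : List Int → Option Int → List (Int × Int)
  | [], _ => []
  | v :: rest, o =>
    let m := match o with | none => v | some l => max l v
    (v, m) :: pvAnnot rest (some m)

theorem pvAnnot_snoc (xs : List Int) (v : Int) (o : Option Int) :
    pvAnnot (xs ++ [v]) o = pvAnnot xs o ++ pvAnnot [v] (xs.foldl pvMaxo o) := by
  induction xs generalizing o with
  | nil => simp [pvAnnot]
  | cons w xs ih =>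
    simp only [List.cons_append, pvAnnot, List.foldl_cons, pvMaxo]
    rw [ih]
    rfl

theorem pvSuff_head (l : List Int) (s : Int) (t : List Int)
    (h : pvSuffList l = s :: t) : l.reverse.foldl pvMaxo none = some s := by
  induction l generalizing s t with
  | nil => simp [pvSuffList] at h
  | cons w rest ih =>
    rw [List.reverse_cons, List.foldl_append]
    cases hr : pvSuffList rest with
    | nil =>
      cases rest with
      | nil =>
        simp only [pvSuffList] at h
        simp only [List.reverse_nil, List.foldl_nil, List.foldl_cons, pvMaxo]
        simp at h
        simp [h]
      | cons a b => simp [pvSuffList] at hr; cases hb : pvSuffList b <;> simp [hb] at hr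
    | cons s' t' =>
      rw [ih s' t' hr]
      simp only [pvSuffList, hr] at h
      simp only [List.foldl_cons, List.foldl_nil, pvMaxo]
      have : s = max w s' := by cases h; rfl
      simp [this, max_comm]

theorem pvZip_annot (l : List Int) :
    (l.zip (pvSuffList l)).reverse = pvAnnot l.reverse none := by
  induction l with
  | nil => simp [pvSuffList, pvAnnot]
  | cons v rest ih =>
    cases hr : pvSuffList rest with
    | nil =>
      cases rest with
      | nil => simp [pvSuffList, pvAnnot]
      | cons a b => simp [pvSuffList] at hr; cases hb : pvSuffList b <;> simp [hb] at hr
    | cons s t =>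
      have hsuff : pvSuffList (v :: rest) = max v s :: s :: t := by
        simp [pvSuffList, hr]
      rw [hsuff]
      have hzip : (v :: rest).zip (max v s :: s :: t)
          = (v, max v s) :: rest.zip (pvSuffList rest) := by
        simp [List.zip, hr]
      rw [hzip, List.reverse_cons, ih, List.reverse_cons, pvAnnot_snoc,
          pvSuff_head rest s t hr]
      simp [pvAnnot, max_comm]

theorem pvMain_gen (r : List Int) (L lo m : Int)
    (h1 : lo ≤ L) (h2 : L - lo ≤ m) (h3 : 0 ≤ m) :
    pvALoop r (some L) (some lo) m = pvBLoop (pvAnnot r (some L)) m := by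
  induction r generalizing L lo m with
  | nil => simp [pvALoop, pvAnnot, pvBLoop]
  | cons v rest ih =>
    simp only [pvALoop, pvAnnot, pvBLoop]
    by_cases hLv : L < v
    · have hmax : max L v = v := by omega
      have hm : max m (0 : Int) = m := by omega
      simp [hLv, hmax, hm, ih v v m le_rfl (by omega) h3]
    · have hmax : max L v = L := by omega
      by_cases hlv : lo > v
      · simp [hLv, hlv, hmax, ih L v (max m (L - v)) (by omega) (by omega) (by omega)]
      · have he1 : max m (L - lo) = m := by omega
        have he2 : max m (L - v) = m := by omega
        simp [hLv, hlv, hmax, he1, he2, ih L lo m h1 h2 h3]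

theorem pvMain (r : List Int) :
    pvALoop r none none 0 = pvBLoop (pvAnnot r none) 0 := by
  cases r with
  | nil => simp [pvALoop, pvAnnot, pvBLoop]
  | cons v rest =>
    have h := pvMain_gen rest v v 0 le_rfl (by omega) le_rfl
    simp [pvALoop, pvAnnot, pvBLoop, h]

-- ===== VERDICT (by name: the statement is the Claim_ definition above) =====
theorem right_side_max_deltas_spec : Claim_equal_right_side_max_deltas := by
  intro prices _
  unfold Spec_right_side_max_deltas right_side_max_deltas right_side_max_deltas_alt
  rw [pvZip_annot, pvMain]
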